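-- pv_equiv track=rewrite | github.com/unprovable/raptor | core/oci/sbom.py | _parse_rfc822_stanza
-- ===== SOURCE A (Python) =====
-- from typing import Iterator, List, Optional
--
-- def _parse_rfc822_stanza(stanza: str) -> dict:
--     """Parse one RFC822-ish stanza into a {field: value} dict.
--     Multi-line values (continuation lines indented by whitespace)
--     get joined with the leading whitespace stripped per dpkg
--     convention."""
--     out: dict = {}
--     current_key: Optional[str] = None
--     for line in stanza.splitlines():
--         if not line:
--             continue
--         if line[0].isspace():
--             # Continuation of previous field's value.
--             if current_key is not None:
--                 out[current_key] = (
--                     out.get(current_key, "") + "\n" + line.strip()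
--                 )
--             continue
--         if ":" not in line:
--             continue
--         key, _, value = line.partition(":")
--         current_key = key.strip()
--         out[current_key] = value.strip()
--     return out
-- ===== SOURCE B (Python) =====
-- def _parse_rfc822_stanza(stanza: str) -> dict:
--     """Parse one RFC822-ish stanza into a {field: value} dict.
--     Two-phase: first group the physical lines into per-field chunks,
--     then parse each chunk into a key/value pair."""
--     # Phase 1: group lines into chunks (head line + its continuation lines).
--     chunks = []
--     open_ = False  # a chunk has been started (never closes once started)
--     for line in stanza.splitlines():
--         if line and line[0].isspace():
--             if open_:
--                 chunks[-1].append(line)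
--         elif line and ":" in line:
--             chunks.append([line])
--             open_ = True
--         # blank lines and non-indented colon-less lines are skipped
--     # Phase 2: parse each chunk; later duplicate keys overwrite in place.
--     out: dict = {}
--     for chunk in chunks:
--         key, _, value = chunk[0].partition(":")
--         value = value.strip()
--         for cont in chunk[1:]:
--             value += "\n" + cont.strip()
--         out[key.strip()] = value
--     return out
-- ===== Notes on version B (the rewrite author's own statement) =====
-- stated objective: alternative
-- what changed: Replaces the single running-state loop (dict mutated while tracking the current key) by a two-phase pipeline: first group physical lines into per-field chunks, then parse each chunk into a key/value pair and insert in order.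
import Mathlib
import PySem

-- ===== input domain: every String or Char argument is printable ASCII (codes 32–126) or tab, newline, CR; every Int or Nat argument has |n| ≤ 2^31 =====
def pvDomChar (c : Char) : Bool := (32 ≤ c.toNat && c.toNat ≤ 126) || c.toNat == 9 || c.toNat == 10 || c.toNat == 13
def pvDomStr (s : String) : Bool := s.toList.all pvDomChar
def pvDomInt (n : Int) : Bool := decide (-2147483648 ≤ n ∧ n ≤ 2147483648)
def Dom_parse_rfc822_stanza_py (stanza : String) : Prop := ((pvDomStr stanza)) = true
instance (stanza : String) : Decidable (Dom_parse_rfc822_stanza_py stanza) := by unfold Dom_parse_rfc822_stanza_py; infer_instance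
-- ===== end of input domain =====

-- B re-implements A's one-pass running-state parse as a two-phase group-then-parse pipeline; same cost, alternative structure.

-- ===== PORT A =====
-- line[0].isspace() on a (nonempty) line
def pvHeadIsSpace (line : List Char) : Bool :=
  match line with
  | c :: _ => PySem.Chars.isspace c
  | [] => false

-- line.partition(":") → (key part, value part); exact: with no ':' the value part is []
def pvPartitionColon (line : List Char) : List Char × List Char :=
  let pre := line.takeWhile (fun c => c ≠ ':')
  (pre, line.drop (pre.length + 1))

-- one iteration of A's loop: state = (out, current_key)
def pvAStep (st : PySem.Dict (List Char) (List Char) × Option (List Char)) (line : List Char) :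
    PySem.Dict (List Char) (List Char) × Option (List Char) :=
  if line.isEmpty then st
  else if pvHeadIsSpace line then
    match st.2 with
    | some k => (st.1.insert k (st.1.getD k [] ++ '\n' :: PySem.Chars.strip line), some k)
    | none => st
  else if !PySem.Chars.isIn [':'] line then st
  else
    let kv := pvPartitionColon line
    let k := PySem.Chars.strip kv.1
    (st.1.insert k (PySem.Chars.strip kv.2), some k)

def parse_rfc822_stanza_py (stanza : String) : List (String × String) :=
  (((PySem.Chars.splitlines stanza.toList).foldl pvAStep (PySem.Dict.empty, none)).1.items).map
    (fun p => (String.mk p.1, String.mk p.2))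

-- ===== PORT B =====
-- chunks[-1].append(line)
def pvAppendLast (chunks : List (List (List Char))) (line : List Char) : List (List (List Char)) :=
  match chunks with
  | [] => []
  | [c] => [c ++ [line]]
  | c :: rest => c :: pvAppendLast rest line

-- phase 1, one line: state = (chunks, open_)
def pvBStep (st : List (List (List Char)) × Bool) (line : List Char) :
    List (List (List Char)) × Bool :=
  if !line.isEmpty && pvHeadIsSpace line then
    if st.2 then (pvAppendLast st.1 line, st.2) else st
  else if !line.isEmpty && PySem.Chars.isIn [':'] line then
    (st.1 ++ [[line]], true)
  else st

-- phase 2, one chunk → (key, value)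
def pvParseChunk (chunk : List (List Char)) : List Char × List Char :=
  match chunk with
  | [] => ([], [])  -- unreachable: every chunk starts with a head line
  | head :: conts =>
    let kv := pvPartitionColon head
    let v := conts.foldl (fun v c => v ++ '\n' :: PySem.Chars.strip c) (PySem.Chars.strip kv.2)
    (PySem.Chars.strip kv.1, v)

def pvInsChunk (d : PySem.Dict (List Char) (List Char)) (chunk : List (List Char)) :
    PySem.Dict (List Char) (List Char) :=
  let kv := pvParseChunk chunk
  d.insert kv.1 kv.2

def parse_rfc822_stanza_py_alt (stanza : String) : List (String × String) :=
  let lines := PySem.Chars.splitlines stanza.toList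
  let chunks := (lines.foldl pvBStep ([], false)).1
  ((chunks.foldl pvInsChunk PySem.Dict.empty).items).map
    (fun p => (String.mk p.1, String.mk p.2))

-- ===== PRECONDITION & SPEC =====
def Spec_parse_rfc822_stanza_py (stanza : String) (out : List (String × String)) : Prop := out = parse_rfc822_stanza_py_alt stanza
instance (stanza : String) (out : List (String × String)) : Decidable (Spec_parse_rfc822_stanza_py stanza out) := by unfold Spec_parse_rfc822_stanza_py; infer_instance

-- ===== CLAIM (what is proved, stated in full; the proofs are below) =====
def Claim_equal_parse_rfc822_stanza_py : Prop := ∀ (stanza : String), Dom_parse_rfc822_stanza_py stanza → Spec_parse_rfc822_stanza_py stanza (parse_rfc822_stanza_py stanza)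

-- ===== LEMMAS AND PROOFS =====

-- grouping in "open" mode: the chunks produced from lines ls with current open chunk c
def pvGAux (ls : List (List Char)) (c : List (List Char)) : List (List (List Char)) :=
  match ls with
  | [] => [c]
  | l :: ls =>
    if !l.isEmpty && pvHeadIsSpace l then pvGAux ls (c ++ [l])
    else if !l.isEmpty && PySem.Chars.isIn [':'] l then c :: pvGAux ls [l]
    else pvGAux ls c

theorem pvAppendLast_append (xs : List (List (List Char))) (y : List (List Char)) (l : List Char) :
    pvAppendLast (xs ++ [y]) l = xs ++ [y ++ [l]] := by
  induction xs with
  | nil => rfl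
  | cons a xs ih =>
    cases xs with
    | nil => simp [pvAppendLast]
    | cons b xs => simpa [pvAppendLast] using ih

theorem pvBFold_open (ls : List (List Char)) :
    ∀ (done : List (List (List Char))) (c : List (List Char)),
    (ls.foldl pvBStep (done ++ [c], true)).1 = done ++ pvGAux ls c := by
  induction ls with
  | nil => intro done c; simp [pvGAux]
  | cons l ls ih =>
    intro done c
    by_cases h1 : (!l.isEmpty && pvHeadIsSpace l) = true
    · simp only [List.foldl_cons, pvBStep, pvGAux, h1, if_true]
      rw [pvAppendLast_append]
      exact ih done (c ++ [l])
    · by_cases h2 : (!l.isEmpty && PySem.Chars.isIn [':'] l) = true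
      · simp only [List.foldl_cons, pvBStep, pvGAux, h1, h2, Bool.false_eq_true, if_false, if_true]
        have := ih (done ++ [c]) [l]
        simpa [List.append_assoc] using this
      · simp only [List.foldl_cons, pvBStep, pvGAux, h1, h2, Bool.false_eq_true, if_false]
        exact ih done c

theorem pvParseChunk_snoc (h : List Char) (conts : List (List Char)) (l : List Char) :
    pvParseChunk (h :: (conts ++ [l])) =
      ((pvParseChunk (h :: conts)).1, (pvParseChunk (h :: conts)).2 ++ '\n' :: PySem.Chars.strip l) := by
  simp [pvParseChunk]

-- the heart: with an open field, A's running state equals B's chunk fold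
theorem pvAFold_open (ls : List (List Char)) :
    ∀ (hc : List Char) (conts : List (List Char)) (d : PySem.Dict (List Char) (List Char)),
    (ls.foldl pvAStep
        (d.insert (pvParseChunk (hc :: conts)).1 (pvParseChunk (hc :: conts)).2,
         some (pvParseChunk (hc :: conts)).1)).1
      = (pvGAux ls (hc :: conts)).foldl pvInsChunk d := by
  induction ls with
  | nil => intro hc conts d; simp [pvGAux, pvInsChunk]
  | cons l ls ih =>
    intro hc conts d
    by_cases h1 : (!l.isEmpty && pvHeadIsSpace l) = true
    · have hne : l.isEmpty = false := by
        cases hh : l.isEmpty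
        · rfl
        · rw [hh] at h1; simp at h1
      have hsp : pvHeadIsSpace l = true := by
        cases hh : pvHeadIsSpace l
        · rw [hh] at h1; simp at h1
        · rfl
      have hstep : pvAStep
          (d.insert (pvParseChunk (hc :: conts)).1 (pvParseChunk (hc :: conts)).2,
           some (pvParseChunk (hc :: conts)).1) l
          = (d.insert (pvParseChunk (hc :: (conts ++ [l]))).1 (pvParseChunk (hc :: (conts ++ [l]))).2,
             some (pvParseChunk (hc :: (conts ++ [l]))).1) := by
        simp [pvAStep, hne, hsp, PySem.Dict.getD_insert_self, PySem.Dict.insert_insert_self,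
          pvParseChunk_snoc]
      have hg : pvGAux (l :: ls) (hc :: conts) = pvGAux ls (hc :: (conts ++ [l])) := by
        simp [pvGAux, h1]
      rw [List.foldl_cons, hstep, hg]
      exact ih hc (conts ++ [l]) d
    · by_cases h2 : (!l.isEmpty && PySem.Chars.isIn [':'] l) = true
      · have hne : l.isEmpty = false := by
          cases hh : l.isEmpty
          · rfl
          · rw [hh] at h2; simp at h2
        have hcol : PySem.Chars.isIn [':'] l = true := by
          cases hh : PySem.Chars.isIn [':'] l
          · rw [hh] at h2; simp at h2
          · rfl
        have hsp : pvHeadIsSpace l = false := by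
          cases hh : pvHeadIsSpace l
          · rfl
          · exact absurd (by simp [hne, hh]) h1
        have hstep : pvAStep
            (d.insert (pvParseChunk (hc :: conts)).1 (pvParseChunk (hc :: conts)).2,
             some (pvParseChunk (hc :: conts)).1) l
            = ((d.insert (pvParseChunk (hc :: conts)).1 (pvParseChunk (hc :: conts)).2).insert
                 (pvParseChunk [l]).1 (pvParseChunk [l]).2,
               some (pvParseChunk [l]).1) := by
          simp [pvAStep, hne, hsp, hcol, pvParseChunk]
        have hg : pvGAux (l :: ls) (hc :: conts) = (hc :: conts) :: pvGAux ls [l] := by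
          simp [pvGAux, h1, h2]
        rw [List.foldl_cons, hstep, hg, List.foldl_cons]
        have := ih l [] (pvInsChunk d (hc :: conts))
        simpa [pvInsChunk] using this
      · have hsp : pvHeadIsSpace l = false ∨ l.isEmpty = true := by
          cases hh : l.isEmpty
          · left
            cases hs : pvHeadIsSpace l
            · rfl
            · exact absurd (by simp [hh, hs]) h1
          · right; rfl
        have hskip : ∀ st : PySem.Dict (List Char) (List Char) × Option (List Char),
            pvAStep st l = st := by
          intro st
          cases hh : l.isEmpty
          · have hs : pvHeadIsSpace l = false := by
              rcases hsp with h | h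
              · exact h
              · rw [hh] at h; cases h
            have hcol : PySem.Chars.isIn [':'] l = false := by
              cases hcc : PySem.Chars.isIn [':'] l
              · rfl
              · exact absurd (by simp [hh, hcc]) h2
            simp [pvAStep, hh, hs, hcol]
          · simp [pvAStep, hh]
        have hg : pvGAux (l :: ls) (hc :: conts) = pvGAux ls (hc :: conts) := by
          simp [pvGAux, h1, h2]
        rw [List.foldl_cons, hskip, hg]
        exact ih hc conts d

-- before any field opens: A's dict equals B's chunk fold
theorem pvAFold_closed (ls : List (List Char)) :
    ∀ (d : PySem.Dict (List Char) (List Char)),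
    (ls.foldl pvAStep (d, none)).1 = ((ls.foldl pvBStep ([], false)).1).foldl pvInsChunk d := by
  induction ls with
  | nil => intro d; rfl
  | cons l ls ih =>
    intro d
    by_cases h2 : (!l.isEmpty && PySem.Chars.isIn [':'] l) = true ∧ pvHeadIsSpace l = false
    · obtain ⟨h2, hsp⟩ := h2
      have hne : l.isEmpty = false := by
        cases hh : l.isEmpty
        · rfl
        · rw [hh] at h2; simp at h2
      have hcol : PySem.Chars.isIn [':'] l = true := by
        cases hh : PySem.Chars.isIn [':'] l
        · rw [hh] at h2; simp at h2
        · rfl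
      have h1 : (!l.isEmpty && pvHeadIsSpace l) = false := by simp [hne, hsp]
      have hstepA : pvAStep (d, none) l
          = (d.insert (pvParseChunk [l]).1 (pvParseChunk [l]).2, some (pvParseChunk [l]).1) := by
        simp [pvAStep, hne, hsp, hcol, pvParseChunk]
      have hstepB : pvBStep ([], false) l = ([[l]], true) := by
        simp [pvBStep, h1, h2]
      rw [List.foldl_cons, List.foldl_cons, hstepA, hstepB]
      have hb := pvBFold_open ls [] [l]
      simp only [List.nil_append] at hb
      rw [hb]
      exact pvAFold_open ls l [] d
    · have hsk : (l.isEmpty = true) ∨ (pvHeadIsSpace l = true) ∨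
          (pvHeadIsSpace l = false ∧ PySem.Chars.isIn [':'] l = false) := by
        cases hh : l.isEmpty
        · cases hs : pvHeadIsSpace l
          · cases hcc : PySem.Chars.isIn [':'] l
            · exact Or.inr (Or.inr ⟨rfl, rfl⟩)
            · exact absurd ⟨by simp [hh, hcc], hs⟩ h2
          · exact Or.inr (Or.inl rfl)
        · exact Or.inl rfl
      have hskipA : pvAStep (d, none) l = (d, none) := by
        rcases hsk with h | h | ⟨h, h'⟩
        · simp [pvAStep, h]
        · by_cases hh : l.isEmpty = true
          · simp [pvAStep, hh]
          · simp [pvAStep, (Bool.not_eq_true _).mp hh, h]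
        · by_cases hh : l.isEmpty = true
          · simp [pvAStep, hh]
          · simp [pvAStep, (Bool.not_eq_true _).mp hh, h, h']
      have hskipB : pvBStep ([], false) l = ([], false) := by
        rcases hsk with h | h | ⟨h, h'⟩
        · simp [pvBStep, h]
        · cases hh : l.isEmpty
          · simp [pvBStep, hh, h]
          · simp [pvBStep, hh]
        · simp [pvBStep, h, h']
      rw [List.foldl_cons, List.foldl_cons, hskipA, hskipB]
      exact ih d

-- ===== VERDICT (by name: the statement is the Claim_ definition above) =====
theorem parse_rfc822_stanza_py_spec : Claim_equal_parse_rfc822_stanza_py := by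
  intro stanza _
  unfold Spec_parse_rfc822_stanza_py parse_rfc822_stanza_py parse_rfc822_stanza_py_alt
  simp only [pvAFold_closed]
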